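-- pv_equiv track=rewrite | github.com/hkassow/leet_solutions | python.py | countAnagrams
-- ===== SOURCE A (Python) =====
-- import math
-- from collections import Counter
--
-- def countAnagrams(s: str) -> int:
--
--
--     s = s.split(' ')
--
--     def permu(word):
--         l = len(word)
--         c = Counter(word)
--
--         res = math.factorial(l)
--
--         for key in c:
--             res = res//(math.factorial(c[key]))
--
--         return res
--
--     count = 1
--
--     for word in s:
--         count *= permu(word)
--         count %= 1000000007
--     return count%1000000007
-- ===== SOURCE B (Python) =====
-- def countAnagrams(s: str) -> int:
--     MOD = 1000000007
--     ans = 1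
--     for word in s.split(' '):
--         occ = {}
--         res = 1
--         i = 0
--         for ch in word:
--             k = occ.get(ch, 0) + 1
--             occ[ch] = k
--             res = res * (i + 1) // k
--             i += 1
--         ans = ans * res % MOD
--     return ans % MOD
-- ===== Notes on version B (the rewrite author's own statement) =====
-- stated objective: alternative
-- what changed: Per word, B replaces the factorial-then-divide-by-counter-factorials computation (Counter pre-pass plus a loop of big-integer floor divisions) by a single incremental pass that maintains the running anagram count res = res*(i+1)//occ[ch], which is exact at every step and never builds len(word)! explicitly.
import Mathlib
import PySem

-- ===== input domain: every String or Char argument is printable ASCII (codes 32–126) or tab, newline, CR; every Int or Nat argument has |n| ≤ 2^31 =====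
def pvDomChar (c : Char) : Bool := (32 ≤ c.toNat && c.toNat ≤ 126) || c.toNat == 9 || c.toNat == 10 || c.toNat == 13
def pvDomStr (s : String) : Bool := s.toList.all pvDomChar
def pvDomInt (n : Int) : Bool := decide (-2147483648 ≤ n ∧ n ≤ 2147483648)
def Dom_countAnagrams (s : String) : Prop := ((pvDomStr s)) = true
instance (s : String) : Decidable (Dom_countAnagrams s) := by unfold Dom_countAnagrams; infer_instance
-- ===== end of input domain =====

-- B replaces A's factorial-then-divide-by-counter-factorials per word by a single
-- incremental exact pass (res = res*(i+1)//occ[ch]); alternative algorithm, same asymptotics.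

-- ===== PORT A =====
-- permu(word): res = factorial(len(word)); for key in Counter(word): res //= factorial(count)
def permuA (word : List Char) : Nat :=
  let c := PySem.Dict.counter word
  c.keys.foldl (fun res key => res / Nat.factorial (c.getD key 0).toNat)
    (Nat.factorial word.length)

def countAnagrams (s : String) : Int :=
  let words := (PySem.Str.split? s " ").getD []
  ((words.foldl (fun count w => count * permuA w.toList % 1000000007) 1 % 1000000007 : Nat) : Int)

-- ===== PORT B =====
-- state = (occ, res, i); k = occ.get(ch,0)+1; occ[ch] = k; res = res*(i+1)//k; i += 1
def permuBStep (st : PySem.Dict Char Nat × Nat × Nat) (ch : Char) :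
    PySem.Dict Char Nat × Nat × Nat :=
  let k := st.1.getD ch 0 + 1
  (st.1.insert ch k, st.2.1 * (st.2.2 + 1) / k, st.2.2 + 1)

def permuB (word : List Char) : Nat :=
  (word.foldl permuBStep (PySem.Dict.empty, 1, 0)).2.1

def countAnagrams_alt (s : String) : Int :=
  (((PySem.Str.split? s " ").getD []).foldl (fun ans w => ans * permuB w.toList % 1000000007) 1
      % 1000000007 : Nat)

-- ===== PRECONDITION & SPEC =====
def Spec_countAnagrams (s : String) (out : Int) : Prop := out = countAnagrams_alt s
instance (s : String) (out : Int) : Decidable (Spec_countAnagrams s out) := by unfold Spec_countAnagrams; infer_instance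

-- ===== CLAIM (what is proved, stated in full; the proofs are below) =====
def Claim_equal_countAnagrams : Prop := ∀ (s : String), Dom_countAnagrams s → Spec_countAnagrams s (countAnagrams s)

-- ===== LEMMAS AND PROOFS =====

-- product of the factorials of the letter multiplicities of w
def pvP (w : List Char) : Nat := ∏ x ∈ w.toFinset, Nat.factorial (w.count x)

lemma pvP_pos (w : List Char) : 0 < pvP w :=
  Finset.prod_pos (fun _ _ => Nat.factorial_pos _)

lemma pvP_dvd (w : List Char) : pvP w ∣ Nat.factorial w.length := by
  have h := Nat.prod_factorial_dvd_factorial_sum w.toFinset (fun x => w.count x)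
  have hs : (∑ x ∈ w.toFinset, w.count x) = w.length := by
    have h2 := Multiset.toFinset_sum_count_eq (w : Multiset Char)
    simpa using h2
  rw [hs] at h
  exact h

lemma pvP_append_singleton (t : List Char) (c : Char) :
    pvP (t ++ [c]) = pvP t * (t.count c + 1) := by
  unfold pvP
  have htf : (t ++ [c]).toFinset = insert c t.toFinset := by
    simp [List.toFinset_append]
  have hcount_ne : ∀ x, x ≠ c → (t ++ [c]).count x = t.count x := by
    intro x hx
    simp only [List.count_append, List.count_singleton']
    simp [Ne.symm hx]
  have hcount_c : (t ++ [c]).count c = t.count c + 1 := by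
    simp [List.count_append]
  by_cases hc : c ∈ t.toFinset
  · rw [htf, Finset.insert_eq_self.mpr hc,
      ← Finset.mul_prod_erase _ (fun x => Nat.factorial ((t ++ [c]).count x)) hc,
      ← Finset.mul_prod_erase _ (fun x => Nat.factorial (t.count x)) hc]
    have hpe : ∏ x ∈ t.toFinset.erase c, Nat.factorial ((t ++ [c]).count x)
        = ∏ x ∈ t.toFinset.erase c, Nat.factorial (t.count x) :=
      Finset.prod_congr rfl (fun x hx => by rw [hcount_ne x (Finset.mem_erase.mp hx).1])
    rw [hpe, hcount_c, Nat.factorial_succ]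
    ring
  · rw [htf, Finset.prod_insert hc]
    have hc0 : t.count c = 0 := by
      rw [List.count_eq_zero]
      exact fun h => hc (List.mem_toFinset.mpr h)
    have hpe : ∏ x ∈ t.toFinset, Nat.factorial ((t ++ [c]).count x)
        = ∏ x ∈ t.toFinset, Nat.factorial (t.count x) :=
      Finset.prod_congr rfl
        (fun x hx => by rw [hcount_ne x (fun h => hc (h ▸ hx))])
    rw [hpe, hcount_c, hc0]
    simp [Nat.factorial]

lemma pv_foldl_div (l : List Char) (f : Char → Nat) (n : Nat) :
    l.foldl (fun r x => r / f x) n = n / (l.map f).prod := by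
  induction l generalizing n with
  | nil => simp
  | cons a l ih => simp [ih, Nat.div_div_eq_div_mul]

lemma pv_prod_ofList (w : List Char) (f : Char → Nat) :
    ((PySem.Set.ofList w : List Char).map f).prod = ∏ x ∈ w.toFinset, f x := by
  rw [← List.prod_toFinset f (PySem.Set.nodup_ofList w)]
  congr 1
  ext x
  simp [List.mem_toFinset, PySem.Set.mem_ofList]

lemma pv_permuA_eq (w : List Char) :
    permuA w = Nat.factorial w.length / pvP w := by
  simp only [permuA]
  have hb : (fun (res : Nat) key =>
        res / Nat.factorial ((PySem.Dict.counter w).getD key 0).toNat)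
      = (fun (res : Nat) key => res / (fun x => Nat.factorial (w.count x)) key) := by
    funext r k
    rw [PySem.Dict.getD_counter]
    simp
  rw [PySem.Dict.keys_counter, hb, pv_foldl_div, pv_prod_ofList]
  rfl

lemma pv_B_inv (w : List Char) :
    (∀ x, (w.foldl permuBStep (PySem.Dict.empty, 1, 0)).1.getD x 0 = w.count x) ∧
    (w.foldl permuBStep (PySem.Dict.empty, 1, 0)).2.2 = w.length ∧
    (w.foldl permuBStep (PySem.Dict.empty, 1, 0)).2.1 * pvP w = Nat.factorial w.length := by
  induction w using List.reverseRecOn with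
  | nil =>
    refine ⟨fun x => ?_, rfl, ?_⟩ <;> simp [pvP]
  | append_singleton t c ih =>
    obtain ⟨hocc, hlen, hres⟩ := ih
    simp only [List.foldl_append, List.foldl_cons, List.foldl_nil]
    set st := t.foldl permuBStep (PySem.Dict.empty, 1, 0) with hst
    have hk : st.1.getD c 0 + 1 = t.count c + 1 := by rw [hocc]
    simp only [permuBStep, hk]
    refine ⟨fun x => ?_, by simp [hlen], ?_⟩
    · by_cases hx : x = c
      · subst hx
        rw [PySem.Dict.getD_insert_self]
        simp [List.count_append]
      · rw [PySem.Dict.getD_insert_of_ne _ _ _ hx, hocc x]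
        simp only [List.count_append, List.count_singleton']
        simp [Ne.symm hx]
    · have hdvd := pvP_dvd (t ++ [c])
      rw [pvP_append_singleton, List.length_append, List.length_singleton] at hdvd
      obtain ⟨u, hu⟩ := hdvd
      have h1 : st.2.1 * (t.length + 1) * pvP t = Nat.factorial (t.length + 1) := by
        rw [Nat.factorial_succ, ← hres]; ring
      have h2 : st.2.1 * (t.length + 1) = (t.count c + 1) * u := by
        refine Nat.eq_of_mul_eq_mul_right (pvP_pos t) ?_
        rw [h1, hu]; ring
      rw [hlen, h2, Nat.mul_div_cancel_left u (Nat.succ_pos _),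
        pvP_append_singleton, List.length_append, List.length_singleton, hu]
      ring

lemma pv_permu_eq (w : List Char) : permuA w = permuB w := by
  obtain ⟨-, -, hres⟩ := pv_B_inv w
  rw [pv_permuA_eq, ← hres, Nat.mul_div_cancel _ (pvP_pos w)]
  rfl

-- ===== VERDICT (by name: the statement is the Claim_ definition above) =====
theorem countAnagrams_spec : Claim_equal_countAnagrams := by
  intro s _
  unfold Spec_countAnagrams countAnagrams countAnagrams_alt
  have hf : (fun (count : Nat) (w : String) => count * permuA w.toList % 1000000007)
      = (fun (count : Nat) (w : String) => count * permuB w.toList % 1000000007) := by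
    funext c w; rw [pv_permu_eq]
  simp only [hf]
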